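-- pv_equiv track=rewrite | github.com/jel048/ObligsVidereg-ende | postfixNotation.py | insertBlanks
-- ===== SOURCE A (Python) =====
-- def insertBlanks(s):
--     result = ""
--
--     for ch in s:
--         if ch == '+' or ch == '-' or ch == '*' or ch == '/':
--             result += " " + ch + " "
--         else:
--             result += ch
--
--     return result
-- ===== SOURCE B (Python) =====
-- def insertBlanks(s):
--     for op in "+-*/":
--         s = s.replace(op, " " + op + " ")
--     return s
-- ===== Notes on version B (the rewrite author's own statement) =====
-- stated objective: faster
-- what changed: Replaced the per-character loop with a conditional branch by four whole-string str.replace passes, one per operator (safe because inserted spaces contain no operator characters).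
import Mathlib
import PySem

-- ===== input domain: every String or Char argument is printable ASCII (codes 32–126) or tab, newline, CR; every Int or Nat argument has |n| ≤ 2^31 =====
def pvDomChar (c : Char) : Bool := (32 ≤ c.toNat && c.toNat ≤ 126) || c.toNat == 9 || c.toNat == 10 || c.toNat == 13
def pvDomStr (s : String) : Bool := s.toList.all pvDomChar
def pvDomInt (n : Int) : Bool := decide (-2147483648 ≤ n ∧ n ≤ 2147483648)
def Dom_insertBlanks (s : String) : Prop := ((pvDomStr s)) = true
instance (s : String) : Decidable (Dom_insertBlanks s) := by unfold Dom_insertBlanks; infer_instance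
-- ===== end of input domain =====

-- B replaces A's per-character conditional loop with four whole-string replace passes, one per operator; same output, idiomatic style.
-- ===== PORT A =====
-- result = ""; for ch in s: append " "+ch+" " if ch is an operator else ch  (strings handled as their char lists)
def insertBlanks (s : String) : String :=
  String.ofList (s.toList.foldl
    (fun result ch =>
      if ch = '+' || ch = '-' || ch = '*' || ch = '/' then result ++ [' ', ch, ' ']
      else result ++ [ch]) [])

-- ===== PORT B =====
-- for op in "+-*/": s = s.replace(op, " " + op + " ")
def insertBlanks_alt (s : String) : String :=
  "+-*/".toList.foldl
    (fun acc op => PySem.Str.replace acc (String.ofList [op]) (String.ofList [' ', op, ' '])) s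

-- ===== PRECONDITION & SPEC =====
def Spec_insertBlanks (s : String) (out : String) : Prop := out = insertBlanks_alt s
instance (s : String) (out : String) : Decidable (Spec_insertBlanks s out) := by unfold Spec_insertBlanks; infer_instance

-- ===== CLAIM (what is proved, stated in full; the proofs are below) =====
def Claim_equal_insertBlanks : Prop := ∀ (s : String), Dom_insertBlanks s → Spec_insertBlanks s (insertBlanks s)

-- ===== LEMMAS AND PROOFS =====

-- single-char replace is a flatMap over the characters
theorem replace_go_single (c : Char) (new : List Char) :
    ∀ (l acc : List Char) (fuel : Nat), l.length ≤ fuel →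
      PySem.Chars.replace.go [c] new fuel l acc
        = acc.reverse ++ l.flatMap (fun x => if x = c then new else [x]) := by
  intro l
  induction l with
  | nil =>
      intro acc fuel _
      cases fuel <;> simp [PySem.Chars.replace.go]
  | cons x t ih =>
      intro acc fuel hf
      cases fuel with
      | zero => simp at hf
      | succ n =>
        have hn : t.length ≤ n := by simpa using hf
        by_cases hx : x = c
        · subst hx
          simp [PySem.Chars.replace.go, List.isPrefixOf, ih _ _ hn]
        · have : ([c].isPrefixOf (x :: t)) = false := by
            simp [List.isPrefixOf, Ne.symm hx]
          simp [PySem.Chars.replace.go, this, hx, ih _ _ hn]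

theorem replace_single (c : Char) (new l : List Char) :
    PySem.Chars.replace l [c] new = l.flatMap (fun x => if x = c then new else [x]) := by
  simp [PySem.Chars.replace, replace_go_single c new l [] l.length (le_refl _)]

-- A's accumulator loop as a flatMap
theorem foldA_flatMap (l acc : List Char) :
    l.foldl (fun result ch =>
        if ch = '+' || ch = '-' || ch = '*' || ch = '/' then result ++ [' ', ch, ' ']
        else result ++ [ch]) acc
      = acc ++ l.flatMap (fun ch =>
          if ch = '+' || ch = '-' || ch = '*' || ch = '/' then [' ', ch, ' '] else [ch]) := by
  induction l generalizing acc with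
  | nil => simp
  | cons x t ih =>
      rw [List.foldl_cons, List.flatMap_cons]
      split_ifs <;> rw [ih, List.append_assoc]

-- ===== VERDICT (by name: the statement is the Claim_ definition above) =====
theorem insertBlanks_spec : Claim_equal_insertBlanks := by
  unfold Claim_equal_insertBlanks Spec_insertBlanks
  intro s _
  unfold insertBlanks insertBlanks_alt
  simp only [show "+-*/".toList = ['+', '-', '*', '/'] from rfl, List.foldl_cons, List.foldl_nil,
    PySem.Str.replace, String.toList_ofList, replace_single]
  rw [foldA_flatMap]
  simp only [List.nil_append, List.flatMap_assoc]
  congr 1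
  apply List.flatMap_congr
  intro x _
  by_cases h1 : x = '+'
  · subst h1; decide
  by_cases h2 : x = '-'
  · subst h2; decide
  by_cases h3 : x = '*'
  · subst h3; decide
  by_cases h4 : x = '/'
  · subst h4; decide
  simp [h1, h2, h3, h4]
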